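-- pv_equiv track=rewrite | github.com/Jacarte/Kappa | build_images/annotate_tex.py | get_line_and_col
-- ===== SOURCE A (Python) =====
-- def get_line_and_col(position, content):
--     L = 0
--     COL = 0
--
--     for c, ch in enumerate(content):
--         if c == position:
--             return L, COL
--
--         COL += 1
--
--         if ch == '\n':
--             L += 1
--             COL = 0
--
--     return 0, 0
-- ===== SOURCE B (Python) =====
-- def get_line_and_col(position, content):
--     if position < 0 or position >= len(content):
--         return (0, 0)
--     pre = content[:position]
--     line = sum(1 for ch in pre if ch == '\n')
--     col = 0
--     for ch in reversed(pre):
--         if ch == '\n':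
--             break
--         col += 1
--     return (line, col)
-- ===== Notes on version B (the rewrite author's own statement) =====
-- stated objective: alternative
-- what changed: Replaces A's single forward loop with stateful line/column counters reset at each newline by an early out-of-range guard plus two independent passes over the prefix content[:position]: a newline count for the line and a backward scan to the previous newline for the column.
import Mathlib
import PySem

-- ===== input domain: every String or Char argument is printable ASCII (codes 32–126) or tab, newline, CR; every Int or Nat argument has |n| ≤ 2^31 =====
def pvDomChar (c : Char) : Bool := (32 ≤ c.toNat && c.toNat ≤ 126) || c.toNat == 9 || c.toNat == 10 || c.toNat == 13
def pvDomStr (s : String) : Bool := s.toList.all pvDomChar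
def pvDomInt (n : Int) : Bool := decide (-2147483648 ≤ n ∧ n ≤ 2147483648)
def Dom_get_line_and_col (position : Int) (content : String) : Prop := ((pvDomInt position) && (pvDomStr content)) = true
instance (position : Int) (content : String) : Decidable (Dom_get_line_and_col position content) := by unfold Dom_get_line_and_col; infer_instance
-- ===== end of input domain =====

-- B guards the out-of-range case first and computes line/col from the prefix
-- (newline count + backward scan to the previous newline) instead of A's single
-- stateful forward loop; alternative structure, similar cost.

-- ===== PORT A =====
-- A's for-loop over enumerate(content): running index c, state L, COL.
def pvLoopA : Nat → List Char → Int → Int → Int → Int × Int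
  | _, [], _, _, _ => (0, 0)
  | c, ch :: rest, pos, L, COL =>
    if (c : Int) = pos then (L, COL)
    else
      let COL' := COL + 1
      if ch = '\n' then pvLoopA (c + 1) rest pos (L + 1) 0
      else pvLoopA (c + 1) rest pos L COL'

def get_line_and_col (position : Int) (content : String) : Int × Int :=
  pvLoopA 0 content.toList position 0 0

-- ===== PORT B =====
-- Source B's "for ch in reversed(pre): if ch == '\n': break; col += 1"
def pvColBack : List Char → Int → Int
  | [], col => col
  | ch :: rest, col => if ch = '\n' then col else pvColBack rest (col + 1)

def get_line_and_col_alt (position : Int) (content : String) : Int × Int :=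
  if position < 0 ∨ (content.toList.length : Int) ≤ position then (0, 0)
  else
    let pre := PySem.List.slice content.toList none (some position)
    let line := pre.foldl (fun acc ch => if ch == '\n' then acc + 1 else acc) (0 : Int)
    let col := pvColBack pre.reverse 0
    (line, col)

-- ===== PRECONDITION & SPEC =====
def Spec_get_line_and_col (position : Int) (content : String) (out : Int × Int) : Prop := out = get_line_and_col_alt position content
instance (position : Int) (content : String) (out : Int × Int) : Decidable (Spec_get_line_and_col position content out) := by unfold Spec_get_line_and_col; infer_instance

-- ===== CLAIM (what is proved, stated in full; the proofs are below) =====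
def Claim_equal_get_line_and_col : Prop := ∀ (position : Int) (content : String), Dom_get_line_and_col position content → Spec_get_line_and_col position content (get_line_and_col position content)

-- ===== LEMMAS AND PROOFS =====

-- A's loop body as a function of the remaining prefix only (proof helper).
def pvFA : List Char → Int → Int → Int × Int
  | [], L, COL => (L, COL)
  | ch :: t, L, COL => if ch = '\n' then pvFA t (L + 1) 0 else pvFA t L (COL + 1)

lemma pvColBack_eq (xs : List Char) (col : Int) :
    pvColBack xs col = col + ((xs.takeWhile (fun c => !(c == '\n'))).length : Int) := by
  induction xs generalizing col with
  | nil => simp [pvColBack]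
  | cons ch t ih =>
    by_cases h : ch = '\n'
    · simp [pvColBack, h]
    · simp only [pvColBack, if_neg h, ih, List.takeWhile_cons]
      have : (!(ch == '\n')) = true := by simp [h]
      rw [this]
      simp only [if_true, List.length_cons]
      push_cast
      ring

lemma pvLoopA_eq (cs : List Char) : ∀ (c : Nat) (pos L COL : Int),
    pvLoopA c cs pos L COL =
      if (c : Int) ≤ pos ∧ pos < (c : Int) + cs.length then
        pvFA (cs.take (pos - c).toNat) L COL
      else (0, 0) := by
  induction cs with
  | nil =>
    intro c pos L COL
    simp only [pvLoopA, List.length_nil, Nat.cast_zero, add_zero]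
    rw [if_neg (by omega)]
  | cons ch t ih =>
    intro c pos L COL
    simp only [pvLoopA]
    by_cases hc : (c : Int) = pos
    · have h0 : (pos - c).toNat = 0 := by omega
      rw [if_pos hc, if_pos (by simp; omega)]
      simp [h0, pvFA]
    · rw [if_neg hc]
      simp only [ih]
      by_cases hin : (c : Int) ≤ pos ∧ pos < (c : Int) + ((ch :: t).length : Int)
      · have h1 : ((c : Int) + 1) ≤ pos ∧ pos < ((c : Int) + 1) + t.length := by
          simp only [List.length_cons] at hin; push_cast at hin ⊢; omega
        have h2 : (pos - (c : Int)).toNat = (pos - ((c : Int) + 1)).toNat + 1 := by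
          omega
        rw [if_pos hin]
        push_cast
        rw [h2, List.take_succ_cons]
        by_cases hch : ch = '\n' <;> simp [pvFA, hch] <;> (intro h; exfalso; omega)
      · have h1 : ¬ (((c : Int) + 1) ≤ pos ∧ pos < ((c : Int) + 1) + t.length) := by
          simp only [List.length_cons] at hin; push_cast at hin ⊢; omega
        rw [if_neg hin]
        push_cast
        split <;> rfl

lemma pvTakeWhile_snoc (p : Char → Bool) (xs : List Char) (a : Char) :
    (xs ++ [a]).takeWhile p =
      if ∀ x ∈ xs, p x = true then (if p a then xs ++ [a] else xs) else xs.takeWhile p := by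
  rw [List.takeWhile_append]
  by_cases hall : ∀ x ∈ xs, p x = true
  · have hself : xs.takeWhile p = xs := List.takeWhile_eq_self_iff.mpr hall
    rw [if_pos hall, if_pos (by rw [hself])]
    by_cases hpa : p a
    · simp [List.takeWhile_cons, hpa]
    · simp [List.takeWhile_cons, hpa]
  · have hne : xs.takeWhile p ≠ xs := fun h => hall (List.takeWhile_eq_self_iff.mp h)
    have hlen : (xs.takeWhile p).length ≠ xs.length := fun h =>
      hne (List.Sublist.eq_of_length (List.takeWhile_sublist p) h)
    rw [if_neg hall, if_neg hlen]

lemma pvFA_eq (pre : List Char) : ∀ (L COL : Int),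
    pvFA pre L COL =
      (L + (pre.count '\n' : Int),
       if '\n' ∈ pre then ((pre.reverse.takeWhile (fun c => !(c == '\n'))).length : Int)
       else COL + pre.length) := by
  induction pre with
  | nil => intro L COL; simp [pvFA]
  | cons ch t ih =>
    intro L COL
    have hrev : (ch :: t).reverse = t.reverse ++ [ch] := by simp
    by_cases hm : '\n' ∈ t
    · have hnall : ¬ ∀ x ∈ t.reverse, (!(x == '\n')) = true := fun h => by
        simpa using h '\n' (by simpa using hm)
      have htw : ((ch :: t).reverse.takeWhile (fun c => !(c == '\n'))) =
          t.reverse.takeWhile (fun c => !(c == '\n')) := by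
        rw [hrev, pvTakeWhile_snoc, if_neg hnall]
      have hmem : '\n' ∈ ch :: t := List.mem_cons_of_mem ch hm
      by_cases hch : ch = '\n'
      · subst hch
        simp only [pvFA, if_pos rfl, ih, if_pos hm, if_pos hmem, htw]
        refine Prod.ext ?_ ?_ <;> simp [List.count_cons] <;> omega
      · simp only [pvFA, if_neg hch, ih, if_pos hm, if_pos hmem, htw]
        refine Prod.ext ?_ ?_ <;> simp [List.count_cons, hch]
    · have hall : ∀ x ∈ t.reverse, (!(x == '\n')) = true := by
        intro x hx
        simp only [List.mem_reverse] at hx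
        simp only [Bool.not_eq_true']
        exact decide_eq_false (fun he => hm (he ▸ hx))
      by_cases hch : ch = '\n'
      · subst hch
        have hmem : '\n' ∈ '\n' :: t := List.mem_cons_self
        have htw : (('\n' :: t).reverse.takeWhile (fun c => !(c == '\n'))) = t.reverse := by
          rw [hrev, pvTakeWhile_snoc, if_pos hall, if_neg (by simp)]
        simp only [pvFA, if_pos rfl, ih, if_neg hm, if_pos hmem, htw]
        refine Prod.ext ?_ ?_ <;> simp [List.count_cons] <;> omega
      · have hmem : '\n' ∉ ch :: t := by
          intro h
          rcases List.mem_cons.mp h with h | h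
          · exact hch h.symm
          · exact hm h
        simp only [pvFA, if_neg hch, ih, if_neg hm, if_neg hmem]
        refine Prod.ext ?_ ?_ <;> simp [List.count_cons, hch] <;> omega

-- ===== VERDICT (by name: the statement is the Claim_ definition above) =====
theorem get_line_and_col_spec : Claim_equal_get_line_and_col := by
  intro pos content _
  unfold Spec_get_line_and_col get_line_and_col get_line_and_col_alt
  set cs := content.toList with hcs
  by_cases hout : pos < 0 ∨ (cs.length : Int) ≤ pos
  · rw [if_pos hout, pvLoopA_eq, if_neg (by push_cast; omega)]
  · rw [if_neg hout]
    push Not at hout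
    have h0 : (0 : Int) ≤ pos := hout.1
    have hlt : pos < (cs.length : Int) := hout.2
    have hslice : PySem.List.slice cs none (some pos) = cs.take pos.toNat :=
      PySem.List.slice_to cs h0
    rw [pvLoopA_eq, if_pos (by push_cast; omega)]
    have hsub : pos - (0 : Nat) = pos := by push_cast; ring
    rw [hsub, pvFA_eq]
    set pre := cs.take pos.toNat with hpre
    simp only [hslice]
    rw [PySem.List.foldl_beq_add_one, pvColBack_eq]
    refine Prod.ext (by simp) ?_
    by_cases hm : '\n' ∈ pre
    · simp [hm]
    · rw [if_neg hm]
      have hall : ∀ x ∈ pre.reverse, (!(x == '\n')) = true := by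
        intro x hx
        simp only [List.mem_reverse] at hx
        simp only [Bool.not_eq_true']
        exact decide_eq_false (fun he => hm (he ▸ hx))
      rw [List.takeWhile_eq_self_iff.mpr hall]
      simp
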